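-- pv_equiv track=rewrite | github.com/jacobwmorgan/lambda-hat | lambda_helper.py | get_parentheses_at_index
-- ===== SOURCE A (Python) =====
-- def get_parentheses_at_index(s, index_skip):
--     end_paren_index = -1
--     # average unity developer
--     for i in range(len(s)):
--         if s[i] == ")":
--             end_paren_index += 1
--             if end_paren_index == index_skip:
--                 for j in range(i, -1, -1):
--                     if s[j] == "(":
--                         return (j, i)
--     return (0, len(s))
-- ===== SOURCE B (Python) =====
-- def get_parentheses_at_index(s, index_skip):
--     # single forward pass: track the most recent '(' position and count ')' seen
--     last_open = -1
--     seen = 0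
--     for i, c in enumerate(s):
--         if c == "(":
--             last_open = i
--         elif c == ")":
--             if seen == index_skip:
--                 return (last_open, i) if last_open >= 0 else (0, len(s))
--             seen += 1
--     return (0, len(s))
-- ===== Notes on version B (the rewrite author's own statement) =====
-- stated objective: alternative
-- what changed: Replaces A's scan-for-the-Nth-')'-then-backward-rescan with one forward pass that carries an accumulator (position of the most recent '(' plus a ')' counter), so the inner backward loop disappears.
import Mathlib
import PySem

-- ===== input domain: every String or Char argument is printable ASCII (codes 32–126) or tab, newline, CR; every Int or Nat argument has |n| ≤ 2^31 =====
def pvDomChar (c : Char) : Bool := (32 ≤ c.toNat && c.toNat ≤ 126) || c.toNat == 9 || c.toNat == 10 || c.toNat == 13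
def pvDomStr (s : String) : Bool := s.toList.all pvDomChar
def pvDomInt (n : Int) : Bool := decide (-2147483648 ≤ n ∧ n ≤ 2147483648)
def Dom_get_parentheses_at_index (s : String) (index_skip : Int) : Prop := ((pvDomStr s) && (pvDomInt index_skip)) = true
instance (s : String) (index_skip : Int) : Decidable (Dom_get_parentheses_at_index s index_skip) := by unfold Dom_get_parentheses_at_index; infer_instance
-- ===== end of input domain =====

-- B replaces A's scan-for-the-Nth-')'-then-backward-rescan by ONE forward pass carrying an
-- accumulator (most recent '(' position and a ')' counter); same return value everywhere.

-- ===== PORT A =====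
-- inner loop: 'for j in range(i, -1, -1): if s[j] == "(": return (j, i)'
-- (every index j visited satisfies 0 ≤ j < len(s), so pyGetD with a dummy default is exact)
def pvA_inner (cs : List Char) (js : List Int) (i : Int) : Option (Int × Int) :=
  match js with
  | [] => none
  | j :: rest =>
    if PySem.List.pyGetD cs j ' ' = '(' then some (j, i) else pvA_inner cs rest i

-- outer loop: 'for i in range(len(s)): …', carrying end_paren_index; 'none' = fell through
def pvA_outer (cs : List Char) (index_skip : Int) (is_ : List Int) (end_paren_index : Int) :
    Option (Int × Int) :=
  match is_ with
  | [] => none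
  | i :: rest =>
    if PySem.List.pyGetD cs i ' ' = ')' then
      let end_paren_index := end_paren_index + 1
      if end_paren_index = index_skip then
        match pvA_inner cs (PySem.List.pyRange i (-1) (-1)) i with
        | some r => some r
        | none => pvA_outer cs index_skip rest end_paren_index
      else pvA_outer cs index_skip rest end_paren_index
    else pvA_outer cs index_skip rest end_paren_index

def get_parentheses_at_index (s : String) (index_skip : Int) : Int × Int :=
  let cs := s.toList
  match pvA_outer cs index_skip (PySem.List.pyRange 0 (cs.length : Int) 1) (-1) with
  | some r => r
  | none => (0, (cs.length : Int))

-- ===== PORT B =====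
-- 'for i, c in enumerate(s): …' carrying (last_open, seen); the two returns and the fallthrough
def pvB_loop (l : List (Int × Char)) (k : Int) (lastOpen seen : Int) (n : Int) : Int × Int :=
  match l with
  | [] => (0, n)
  | (i, c) :: rest =>
    if c = '(' then pvB_loop rest k i seen n
    else if c = ')' then
      if seen = k then (if 0 ≤ lastOpen then (lastOpen, i) else (0, n))
      else pvB_loop rest k lastOpen (seen + 1) n
    else pvB_loop rest k lastOpen seen n

def get_parentheses_at_index_alt (s : String) (index_skip : Int) : Int × Int :=
  pvB_loop (PySem.List.enumerate s.toList 0) index_skip (-1) 0 (PySem.Str.len s)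

-- ===== PRECONDITION & SPEC =====
def Spec_get_parentheses_at_index (s : String) (index_skip : Int) (out : Int × Int) : Prop := out = get_parentheses_at_index_alt s index_skip
instance (s : String) (index_skip : Int) (out : Int × Int) : Decidable (Spec_get_parentheses_at_index s index_skip out) := by unfold Spec_get_parentheses_at_index; infer_instance

-- ===== CLAIM =====
def Claim_equal_get_parentheses_at_index : Prop := ∀ (s : String) (index_skip : Int), Dom_get_parentheses_at_index s index_skip → Spec_get_parentheses_at_index s index_skip (get_parentheses_at_index s index_skip)

-- ===== LEMMAS AND PROOFS =====

-- largest j < m with cs[j] = '(' (spec of A's backward scan / of B's running accumulator)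
def pvLastOpen (cs : List Char) : Nat → Option Nat
  | 0 => none
  | m + 1 => if cs[m]? = some '(' then some m else pvLastOpen cs m

-- B encodes pvLastOpen as an Int (-1 = none)
def pvOptI : Option Nat → Int
  | some j => (j : Int)
  | none => -1

-- index of the t-th ')' at position ≥ a (the common spec of A's outer loop and B's counter)
def pvNthClose (cs : List Char) (a : Nat) (t : Int) : Option Int :=
  if h : a < cs.length then
    if cs[a] = ')' then
      if t = 0 then some (a : Int) else pvNthClose cs (a + 1) (t - 1)
    else pvNthClose cs (a + 1) t
  else none
  termination_by cs.length - a

-- the canonical value both programs compute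
def pvCanon (cs : List Char) (k n : Int) : Int × Int :=
  match pvNthClose cs 0 k with
  | none => (0, n)
  | some i =>
    match pvLastOpen cs i.toNat with
    | some j => ((j : Int), i)
    | none => (0, n)

theorem pv_inner_eq (cs : List Char) (m : Nat) (v : Int) :
    pvA_inner cs (PySem.List.pyRange ((m : Int) - 1) (-1) (-1)) v
      = (pvLastOpen cs m).map (fun j => ((j : Int), v)) := by
  induction m with
  | zero =>
    rw [show ((0 : Nat) : Int) - 1 = -1 by norm_num,
      PySem.List.pyRange_neg_one_eq_nil (by norm_num)]
    simp [pvA_inner, pvLastOpen]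
  | succ m ih =>
    rw [show ((m + 1 : Nat) : Int) - 1 = (m : Int) by push_cast; ring,
      PySem.List.pyRange_neg_one_cons (by omega : (-1 : Int) < (m : Int))]
    simp only [pvA_inner, PySem.List.pyGetD_natCast, pvLastOpen]
    by_cases h : m < cs.length
    · rw [List.getD_eq_getElem cs ' ' h]
      simp only [List.getElem?_eq_getElem h]
      by_cases hc : cs[m] = '('
      · simp [hc]
      · simp [hc, ih]
    · rw [List.getD_eq_default cs ' ' (by omega)]
      simp only [List.getElem?_eq_none (by omega : cs.length ≤ m)]
      simp [ih]

theorem pv_nth_neg (cs : List Char) (a : Nat) (t : Int) (ht : t < 0) :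
    pvNthClose cs a t = none := by
  fun_induction pvNthClose cs a t with
  | case1 a ha hc => omega
  | case2 a t ha hc ht0 ih => exact ih (by omega)
  | case3 a t ha hc ih => exact ih ht
  | case4 ha => rfl

theorem pv_nth_some (cs : List Char) (a : Nat) (t : Int) (i : Int)
    (h : pvNthClose cs a t = some i) :
    0 ≤ i ∧ i.toNat < cs.length ∧ cs[i.toNat]? = some ')' := by
  fun_induction pvNthClose cs a t with
  | case1 a ha hc =>
    rw [Option.some_inj] at h
    refine ⟨by omega, by omega, ?_⟩
    rw [show i.toNat = a by omega]
    simp [List.getElem?_eq_getElem ha, hc]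
  | case2 a t ha hc ht0 ih => exact ih h
  | case3 a t ha hc ih => exact ih h
  | case4 ha => simp at h

theorem pv_outer_eq (cs : List Char) (k : Int) (a : Nat) (ha : a ≤ cs.length) (e : Int) :
    pvA_outer cs k (PySem.List.pyRange (a : Int) (cs.length : Int) 1) e
      = match pvNthClose cs a (k - e - 1) with
        | none => none
        | some i => pvA_inner cs (PySem.List.pyRange i (-1) (-1)) i := by
  induction hf : cs.length - a generalizing a e with
  | zero =>
    have haa : a = cs.length := by omega
    rw [PySem.List.pyRange_one_eq_nil (by omega : (cs.length : Int) ≤ (a : Int))]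
    rw [pvNthClose]
    simp [pvA_outer, dif_neg (by omega : ¬ a < cs.length)]
  | succ f ih =>
    have hlt : a < cs.length := by omega
    rw [PySem.List.pyRange_one_cons (by omega : (a : Int) < (cs.length : Int))]
    conv_rhs => rw [pvNthClose]
    rw [dif_pos hlt]
    simp only [pvA_outer, PySem.List.pyGetD_natCast, List.getD_eq_getElem cs ' ' hlt]
    have hcast : (a : Int) + 1 = ((a + 1 : Nat) : Int) := by push_cast; ring
    by_cases hc : cs[a] = ')'
    · rw [if_pos hc, if_pos hc]
      by_cases hke : e + 1 = k
      · rw [if_pos hke, if_pos (by omega : k - e - 1 = 0)]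
        cases hin : pvA_inner cs (PySem.List.pyRange (a : Int) (-1) (-1)) (a : Int) with
        | some r => exact hin.symm
        | none =>
          rw [hcast, ih (a + 1) (by omega) (e + 1) (by omega),
            pv_nth_neg cs (a + 1) (k - (e + 1) - 1) (by omega)]
          simp [hin]
      · rw [if_neg hke, if_neg (by omega : ¬ k - e - 1 = 0)]
        rw [hcast, ih (a + 1) (by omega) (e + 1) (by omega)]
        have : k - (e + 1) - 1 = k - e - 1 - 1 := by ring
        rw [this]
    · rw [if_neg hc, if_neg hc, hcast, ih (a + 1) (by omega) e (by omega)]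

-- A computes the canonical value
theorem pvA_canon (s : String) (k : Int) :
    get_parentheses_at_index s k = pvCanon s.toList k (s.toList.length : Int) := by
  simp only [get_parentheses_at_index, pvCanon]
  have hout := pv_outer_eq s.toList k 0 (Nat.zero_le _) (-1)
  simp only [Nat.cast_zero] at hout
  rw [show k - (-1) - 1 = k by ring] at hout
  rw [hout]
  cases hN : pvNthClose s.toList 0 k with
  | none => simp
  | some i =>
    obtain ⟨hi0, hilen, hichar⟩ := pv_nth_some s.toList 0 k i hN
    have hinner := pv_inner_eq s.toList (i.toNat + 1) i
    rw [show ((i.toNat + 1 : Nat) : Int) - 1 = i by omega] at hinner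
    have hLO : pvLastOpen s.toList (i.toNat + 1) = pvLastOpen s.toList i.toNat := by
      simp [pvLastOpen, hichar]
    rw [hLO] at hinner
    dsimp only
    rw [hinner]
    cases hL : pvLastOpen s.toList i.toNat with
    | none => simp
    | some j => simp

-- B's loop invariant: at position a with lastOpen = pvOptI (pvLastOpen cs a) and counter e,
-- the loop computes the canonical continuation
theorem pvB_inv (cs : List Char) (k n : Int) (a : Nat) (ha : a ≤ cs.length) (e : Int) :
    pvB_loop (PySem.List.enumerate (cs.drop a) (a : Int)) k (pvOptI (pvLastOpen cs a)) e n
      = match pvNthClose cs a (k - e) with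
        | none => (0, n)
        | some i =>
          match pvLastOpen cs i.toNat with
          | some j => ((j : Int), i)
          | none => (0, n) := by
  induction hf : cs.length - a generalizing a e with
  | zero =>
    have haa : a = cs.length := by omega
    rw [List.drop_eq_nil_of_le (by omega), pvNthClose]
    simp [pvB_loop, PySem.List.enumerate, dif_neg (by omega : ¬ a < cs.length)]
  | succ f ih =>
    have hlt : a < cs.length := by omega
    rw [← List.getElem_cons_drop hlt, PySem.List.enumerate_cons]
    conv_rhs => rw [pvNthClose]
    rw [dif_pos hlt]
    simp only [pvB_loop]
    have hcast : (a : Int) + 1 = ((a + 1 : Nat) : Int) := by push_cast; ring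
    have hsucc : ∀ c, cs[a] = c → cs[a]? = some c := by
      intro c hc; simp [List.getElem?_eq_getElem hlt, hc]
    by_cases hop : cs[a] = '('
    · rw [if_pos hop, if_neg (by rw [hop]; decide : ¬ cs[a] = ')')]
      have hlo : pvLastOpen cs (a + 1) = some a := by
        simp [pvLastOpen, hsucc '(' hop]
      have h2 := ih (a + 1) (by omega) e (by omega)
      rw [hlo] at h2
      simp only [pvOptI] at h2
      rw [hcast]
      exact h2
    · rw [if_neg hop]
      have hlo : pvLastOpen cs (a + 1) = pvLastOpen cs a := by
        simp only [pvLastOpen]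
        rw [if_neg (by simp [List.getElem?_eq_getElem hlt, hop])]
      by_cases hc : cs[a] = ')'
      · rw [if_pos hc, if_pos hc]
        by_cases hek : e = k
        · rw [if_pos hek, if_pos (by omega : k - e = 0)]
          dsimp only
          rw [show ((a : Int)).toNat = a by omega]
          cases hL : pvLastOpen cs a with
          | none => simp [pvOptI]
          | some j => simp [pvOptI]
        · rw [if_neg hek, if_neg (by omega : ¬ k - e = 0)]
          rw [← hlo, hcast, ih (a + 1) (by omega) (e + 1) (by omega)]
          rw [show k - (e + 1) = k - e - 1 by ring]
      · rw [if_neg hc, if_neg hc, ← hlo, hcast, ih (a + 1) (by omega) e (by omega)]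

-- B computes the canonical value
theorem pvB_canon (s : String) (k : Int) :
    get_parentheses_at_index_alt s k = pvCanon s.toList k (s.toList.length : Int) := by
  simp only [get_parentheses_at_index_alt, pvCanon]
  have h := pvB_inv s.toList k (PySem.Str.len s) 0 (Nat.zero_le _) 0
  simp only [Nat.cast_zero, List.drop_zero, pvLastOpen, pvOptI, sub_zero] at h
  rw [h]
  have hlen : PySem.Str.len s = (s.toList.length : Int) := by
    simp [PySem.Str.len]
  rw [hlen]

-- ===== VERDICT =====
theorem get_parentheses_at_index_spec : Claim_equal_get_parentheses_at_index := by
  intro s k _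
  unfold Spec_get_parentheses_at_index
  rw [pvA_canon, pvB_canon]
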